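-- pv_equiv track=rewrite | github.com/acje/cherry-pit | scripts/gen-adr-graph.py | domain_layout_rows
-- ===== SOURCE A (Python) =====
-- TIER_ORDER = ("S", "A", "B", "C", "D")
--
-- MAX_DOMAIN_ROW_WIDTH = 5
--
-- def chunked(items: list[str], size: int) -> list[list[str]]:
--     return [items[i : i + size] for i in range(0, len(items), size)]
--
-- def domain_layout_rows(ids: list[str], adrs: dict[str, dict]) -> list[tuple[str, list[str]]]:
--     """Return bottom-to-top layout rows for one domain.
--
--     Rows are capped at MAX_DOMAIN_ROW_WIDTH so a single domain never becomes
--     wider than five ADR nodes. Root rows come first, then non-root ADRs follow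
--     tier order so the bottom-up render reads Root, S, A, B, C, D.
--     """
--     rows: list[tuple[str, list[str]]] = []
--
--     roots = sorted(adr_id for adr_id in ids if adrs[adr_id].get("is_root"))
--     root_set = set(roots)
--     non_roots = [adr_id for adr_id in ids if adr_id not in root_set]
--
--     for index, chunk in enumerate(chunked(roots, MAX_DOMAIN_ROW_WIDTH)):
--         rows.append((f"root_{index}", chunk))
--
--     for tier in TIER_ORDER:
--         tier_ids = sorted(adr_id for adr_id in non_roots if adrs[adr_id].get("tier") == tier)
--         for index, chunk in enumerate(chunked(tier_ids, MAX_DOMAIN_ROW_WIDTH)):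
--             rows.append((f"tier_{tier}_{index}", chunk))
--
--     unknown = sorted(adr_id for adr_id in non_roots if adrs[adr_id].get("tier") not in TIER_ORDER)
--     for index, chunk in enumerate(chunked(unknown, MAX_DOMAIN_ROW_WIDTH)):
--         rows.append((f"tier_unknown_{index}", chunk))
--
--     return rows
-- ===== SOURCE B (Python) =====
-- TIER_ORDER = ("S", "A", "B", "C", "D")
--
-- MAX_DOMAIN_ROW_WIDTH = 5
--
-- def _label(meta: dict) -> str:
--     if meta.get("is_root"):
--         return "root"
--     tier = meta.get("tier")
--     return f"tier_{tier}" if tier in TIER_ORDER else "tier_unknown"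
--
-- def domain_layout_rows(ids: list[str], adrs: dict[str, dict]) -> list[tuple[str, list[str]]]:
--     """One pass: bucket ids by label (root / tier_X / tier_unknown), then sort and chunk each bucket in fixed order."""
--     buckets: dict[str, list[str]] = {}
--     for adr_id in ids:
--         buckets.setdefault(_label(adrs[adr_id]), []).append(adr_id)
--     rows: list[tuple[str, list[str]]] = []
--     for label in ("root", "tier_S", "tier_A", "tier_B", "tier_C", "tier_D", "tier_unknown"):
--         items = sorted(buckets.get(label, []))
--         for i in range(0, len(items), MAX_DOMAIN_ROW_WIDTH):
--             rows.append((f"{label}_{i // MAX_DOMAIN_ROW_WIDTH}", items[i : i + MAX_DOMAIN_ROW_WIDTH]))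
--     return rows
-- ===== Notes on version B (the rewrite author's own statement) =====
-- stated objective: simpler
-- what changed: B classifies each id once in a single pass into a dict of label buckets (root / tier_X / tier_unknown) and then sorts and chunks each bucket in fixed label order, instead of A's sorted-roots list, root set and six separate rescans of non_roots.
import Mathlib
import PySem

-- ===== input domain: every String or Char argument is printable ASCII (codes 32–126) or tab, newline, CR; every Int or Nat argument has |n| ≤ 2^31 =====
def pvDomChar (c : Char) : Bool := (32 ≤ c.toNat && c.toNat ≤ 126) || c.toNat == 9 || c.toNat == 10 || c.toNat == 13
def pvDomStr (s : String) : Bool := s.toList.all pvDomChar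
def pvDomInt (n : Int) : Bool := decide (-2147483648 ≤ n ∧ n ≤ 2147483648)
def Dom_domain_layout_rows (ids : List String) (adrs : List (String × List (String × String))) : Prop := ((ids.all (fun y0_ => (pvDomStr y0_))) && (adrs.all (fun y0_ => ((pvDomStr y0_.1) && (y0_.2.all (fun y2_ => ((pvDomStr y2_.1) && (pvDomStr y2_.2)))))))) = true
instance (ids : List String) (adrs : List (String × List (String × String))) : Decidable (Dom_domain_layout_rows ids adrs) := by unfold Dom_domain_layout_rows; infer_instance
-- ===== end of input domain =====

-- B buckets each id by its label in ONE pass over `ids` (a dict of lists), instead of A's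
-- sorted-roots + root_set + six separate rescans of `non_roots`; same rows, same order.

-- ===== shared module context (TIER_ORDER, dict access, truthiness) =====
-- TIER_ORDER = ("S", "A", "B", "C", "D")
def pvTierOrder : List String := ["S", "A", "B", "C", "D"]

-- Python truthiness of `md.get(k)` where the stored values are strings:
-- None and "" are falsy, any other string is truthy.
def pvTruthy (o : Option String) : Bool :=
  match o with
  | some s => s != ""
  | none => false

-- `adrs[adr_id]` (first-match association-list lookup; KeyError is excluded by Pre_,
-- so the total `getD` with default [] is exact on Pre_).
def pvAdr (adrs : List (String × List (String × String))) (a : String) : PySem.Dict String String :=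
  PySem.Dict.mk ((PySem.Dict.mk adrs).getD a [])

-- ===== PORT A =====
-- chunked(items, size) = [items[i : i + size] for i in range(0, len(items), size)]
def pvChunked (items : List String) (size : Int) : List (List String) :=
  (PySem.List.pyRange 0 (items.length : Int) size).map
    (fun i => PySem.List.slice items (some i) (some (i + size)))

def domain_layout_rows (ids : List String) (adrs : List (String × List (String × String))) : List (String × List String) :=
  let roots := PySem.List.sorted (ids.filter (fun a => pvTruthy ((pvAdr adrs a).get? "is_root"))) (fun x => x) false
  let root_set := PySem.Set.ofList roots
  let non_roots := ids.filter (fun a => !(PySem.Set.contains root_set a))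
  let rows := (PySem.List.enumerate (pvChunked roots 5) 0).map
    (fun p => ("root_" ++ PySem.Int.toStr p.1, p.2))
  let rows := pvTierOrder.foldl (fun rows tier =>
    let tier_ids := PySem.List.sorted (non_roots.filter (fun a => (pvAdr adrs a).get? "tier" == some tier)) (fun x => x) false
    rows ++ (PySem.List.enumerate (pvChunked tier_ids 5) 0).map
      (fun p => ("tier_" ++ tier ++ "_" ++ PySem.Int.toStr p.1, p.2))) rows
  let unknown := PySem.List.sorted (non_roots.filter (fun a =>
    !(match (pvAdr adrs a).get? "tier" with
      | some t => pvTierOrder.contains t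
      | none => false))) (fun x => x) false
  rows ++ (PySem.List.enumerate (pvChunked unknown 5) 0).map
    (fun p => ("tier_unknown_" ++ PySem.Int.toStr p.1, p.2))

-- ===== PORT B =====
-- _label(md): "root" if md.get("is_root") else f"tier_{t}" when t in TIER_ORDER else "tier_unknown"
def pvLabel (md : PySem.Dict String String) : String :=
  if pvTruthy (md.get? "is_root") then "root"
  else
    match md.get? "tier" with
    | some t => if pvTierOrder.contains t then "tier_" ++ t else "tier_unknown"
    | none => "tier_unknown"

def domain_layout_rows_alt (ids : List String) (adrs : List (String × List (String × String))) : List (String × List String) :=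
  let buckets := ids.foldl (fun d a => d.modify (pvLabel (pvAdr adrs a)) [] (fun xs => xs ++ [a])) PySem.Dict.empty
  ["root", "tier_S", "tier_A", "tier_B", "tier_C", "tier_D", "tier_unknown"].foldl (fun rows label =>
    let items := PySem.List.sorted (buckets.getD label []) (fun x => x) false
    rows ++ (PySem.List.pyRange 0 (items.length : Int) 5).map (fun i =>
      (label ++ "_" ++ PySem.Int.toStr (PySem.Int.floordiv i 5),
       PySem.List.slice items (some i) (some (i + 5))))) []

-- ===== PRECONDITION & SPEC =====
-- Pre_ excludes exactly the inputs on which Python A raises KeyError: some id in `ids`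
-- that is not a key of `adrs`.
def Pre_domain_layout_rows (ids : List String) (adrs : List (String × List (String × String))) : Prop :=
  ∀ a ∈ ids, (PySem.Dict.mk adrs).contains a = true
instance (ids : List String) (adrs : List (String × List (String × String))) : Decidable (Pre_domain_layout_rows ids adrs) := by unfold Pre_domain_layout_rows; infer_instance

def pvWitness_domain_layout_rows : List String × (List (String × List (String × String))) :=
  (["adr-1", "adr-2"], [("adr-1", [("is_root", "1")]), ("adr-2", [("tier", "S")])])

def Spec_domain_layout_rows (ids : List String) (adrs : List (String × List (String × String))) (out : List (String × List String)) : Prop := out = domain_layout_rows_alt ids adrs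
instance (ids : List String) (adrs : List (String × List (String × String))) (out : List (String × List String)) : Decidable (Spec_domain_layout_rows ids adrs out) := by unfold Spec_domain_layout_rows; infer_instance

-- ===== CLAIM (what is proved, stated in full; the proofs are below) =====
def Claim_equal_domain_layout_rows : Prop := ∀ (ids : List String) (adrs : List (String × List (String × String))), Dom_domain_layout_rows ids adrs → Pre_domain_layout_rows ids adrs → Spec_domain_layout_rows ids adrs (domain_layout_rows ids adrs)

-- ===== LEMMAS AND PROOFS =====

-- A's enumerate-over-chunked rows are B's rows indexed by i // 5 over range(0, len, 5).
lemma emit_eq (items : List String) (pre : String) :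
    (PySem.List.enumerate (pvChunked items 5) 0).map (fun p => (pre ++ PySem.Int.toStr p.1, p.2))
    = (PySem.List.pyRange 0 (items.length : Int) 5).map (fun i =>
        (pre ++ PySem.Int.toStr (PySem.Int.floordiv i 5),
         PySem.List.slice items (some i) (some (i + 5)))) := by
  unfold pvChunked
  rw [PySem.List.pyRange_of_pos 0 (items.length : Int) (by norm_num)]
  apply List.ext_getElem
  · simp [PySem.List.length_enumerate]
  · intro k h1 h2
    have hk : k < (List.range (if (0:Int) < (items.length:Int) then (((items.length:Int) - 0 + 5 - 1) / 5).toNat else 0)).length := by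
      simpa [PySem.List.length_enumerate] using h2
    simp only [List.getElem_map]
    rw [PySem.List.getElem_enumerate]
    simp only [List.getElem_map, List.getElem_range]
    have h5 : PySem.Int.floordiv (0 + 5 * (k : Int)) 5 = 0 + (k : Int) := by
      rw [PySem.Int.floordiv_eq_iff_of_pos (by norm_num)]
      constructor <;> omega
    rw [h5]

-- the one-pass bucket dict, read back per label, is a filter of ids
lemma bucket_getD (ids : List String) (adrs : List (String × List (String × String))) (L : String) :
    (ids.foldl (fun d a => d.modify (pvLabel (pvAdr adrs a)) [] (fun xs => xs ++ [a])) PySem.Dict.empty).getD L []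
    = ids.filter (fun a => pvLabel (pvAdr adrs a) == L) := by
  have h := PySem.Dict.getD_foldl_modify_append
    (ids.map (fun a => (pvLabel (pvAdr adrs a), a))) (PySem.Dict.empty (κ := String) (ν := List String)) L
  rw [List.foldl_map] at h
  rw [h, List.filter_map, List.map_map]
  simp only [PySem.Dict.getD_empty, List.nil_append, Function.comp_def, List.map_id']

lemma label_eq_root (md : PySem.Dict String String) :
    (pvLabel md == "root") = pvTruthy (md.get? "is_root") := by
  unfold pvLabel
  by_cases hr : pvTruthy (md.get? "is_root") = true
  · simp [hr]
  · simp only [Bool.not_eq_true] at hr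
    simp only [hr]
    cases hmd : md.get? "tier" with
    | none => decide
    | some u =>
      by_cases hc : pvTierOrder.contains u = true
      · simp only [hc, if_true]
        have hu : u ∈ pvTierOrder := by simpa using hc
        fin_cases hu <;> decide
      · have hu : u ∉ pvTierOrder := by
          simpa using hc
        simp [hu]

lemma label_eq_tier (md : PySem.Dict String String) (t : String) (ht : t ∈ pvTierOrder) :
    (pvLabel md == "tier_" ++ t)
    = ((md.get? "tier" == some t) && !pvTruthy (md.get? "is_root")) := by
  unfold pvLabel
  by_cases hr : pvTruthy (md.get? "is_root") = true
  · simp only [hr, if_true, Bool.not_true, Bool.and_false]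
    fin_cases ht <;> decide
  · simp only [Bool.not_eq_true] at hr
    simp only [hr, Bool.not_false, Bool.and_true]
    cases hmd : md.get? "tier" with
    | none => fin_cases ht <;> decide
    | some u =>
      by_cases hc : pvTierOrder.contains u = true
      · simp only [hc, if_true]
        have hu : u ∈ pvTierOrder := by simpa using hc
        fin_cases hu <;> fin_cases ht <;> decide
      · simp only [Bool.not_eq_true] at hc
        simp only [hc]
        have hut : u ≠ t := by
          intro h; subst h; fin_cases ht <;> simp [pvTierOrder] at hc
        simp [hut]
        fin_cases ht <;> decide

lemma label_eq_unknown (md : PySem.Dict String String) :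
    (pvLabel md == "tier_unknown")
    = (!(match md.get? "tier" with
         | some t => pvTierOrder.contains t
         | none => false) && !pvTruthy (md.get? "is_root")) := by
  unfold pvLabel
  by_cases hr : pvTruthy (md.get? "is_root") = true
  · simp [hr]
  · simp only [Bool.not_eq_true] at hr
    simp only [hr, Bool.not_false, Bool.and_true]
    cases hmd : md.get? "tier" with
    | none => decide
    | some u =>
      by_cases hc : pvTierOrder.contains u = true
      · simp only [hc, Bool.not_true, if_true]
        have hu : u ∈ pvTierOrder := by simpa using hc
        fin_cases hu <;> decide
      · have hu : u ∉ pvTierOrder := by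
          simpa using hc
        simp [hu]

-- concrete-tier instances of label_eq_tier (the bucket labels are literals in B)
lemma label_eq_tier_S (md : PySem.Dict String String) :
    (pvLabel md == "tier_S") = ((md.get? "tier" == some "S") && !pvTruthy (md.get? "is_root")) :=
  label_eq_tier md "S" (by decide)
lemma label_eq_tier_A (md : PySem.Dict String String) :
    (pvLabel md == "tier_A") = ((md.get? "tier" == some "A") && !pvTruthy (md.get? "is_root")) :=
  label_eq_tier md "A" (by decide)
lemma label_eq_tier_B (md : PySem.Dict String String) :
    (pvLabel md == "tier_B") = ((md.get? "tier" == some "B") && !pvTruthy (md.get? "is_root")) :=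
  label_eq_tier md "B" (by decide)
lemma label_eq_tier_C (md : PySem.Dict String String) :
    (pvLabel md == "tier_C") = ((md.get? "tier" == some "C") && !pvTruthy (md.get? "is_root")) :=
  label_eq_tier md "C" (by decide)
lemma label_eq_tier_D (md : PySem.Dict String String) :
    (pvLabel md == "tier_D") = ((md.get? "tier" == some "D") && !pvTruthy (md.get? "is_root")) :=
  label_eq_tier md "D" (by decide)

-- A's non_roots filter (via the root set) is the pointwise not-is_root filter
lemma nonroots_eq (ids : List String) (adrs : List (String × List (String × String))) :
    ids.filter (fun a => !(PySem.Set.contains (PySem.Set.ofList (PySem.List.sorted (ids.filter (fun a => pvTruthy ((pvAdr adrs a).get? "is_root"))) (fun x => x) false)) a))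
    = ids.filter (fun a => !pvTruthy ((pvAdr adrs a).get? "is_root")) := by
  apply List.filter_congr
  intro a ha
  have hmem : PySem.Set.contains (PySem.Set.ofList (PySem.List.sorted (ids.filter (fun a => pvTruthy ((pvAdr adrs a).get? "is_root"))) (fun x => x) false)) a
      = pvTruthy ((pvAdr adrs a).get? "is_root") := by
    rw [Bool.eq_iff_iff]
    constructor
    · intro h
      have h1 := (PySem.Set.contains_iff _ _).mp h
      rw [PySem.Set.mem_ofList, PySem.List.mem_sorted, List.mem_filter] at h1
      exact h1.2
    · intro hT
      exact (PySem.Set.contains_iff _ _).mpr ((PySem.Set.mem_ofList _ _).mpr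
        ((PySem.List.mem_sorted _ _ _ _).mpr (List.mem_filter.mpr ⟨ha, hT⟩)))
  rw [hmem]

-- ===== VERDICT (by name: the statement is the Claim_ definition above) =====
theorem domain_layout_rows_spec : Claim_equal_domain_layout_rows := by
  intro ids adrs _ _
  unfold Spec_domain_layout_rows
  simp only [domain_layout_rows, domain_layout_rows_alt, pvTierOrder, List.foldl_cons, List.foldl_nil]
  simp only [bucket_getD]
  simp only [label_eq_root, label_eq_tier_S, label_eq_tier_A, label_eq_tier_B, label_eq_tier_C,
    label_eq_tier_D, label_eq_unknown]
  rw [nonroots_eq]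
  simp only [List.filter_filter]
  simp only [emit_eq]
  rfl
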